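-- pv_equiv track=rewrite | github.com/James-HoneyBadger/Time_Warp_Studio | Platforms/Python/time_warp/languages/javascript.py | _add_undefined_defaults
-- ===== SOURCE A (Python) =====
-- def _add_undefined_defaults(params: str) -> str:
--     """Add =_undefined defaults to params that don't already have defaults.
--     e.g. 'a, b=1, c' -> 'a=_undefined, b=1, c=_undefined'
--     Needed so JS-style calls with fewer args than params don't raise TypeError.
--     Skips *args params (rest params).
--     """
--     if not params.strip():
--         return params
--     parts = _split_decl_commas(params)
--     result = []
--     saw_default = False
--     for p in parts:
--         p = p.strip()
--         if p.startswith('*') or '=' in p: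
--             if '=' in p and not p.startswith('*'):
--                 saw_default = True
--             result.append(p)
--         else:
--             result.append(f"{p}=_undefined")
--             saw_default = True
--     return ", ".join(result)
--
-- def _split_decl_commas(s: str) -> list:
--     """Split a multi-variable declaration body on commas at depth 0.
--     e.g. 'a = 1, b = 2' -> ['a = 1', 'b = 2']
--     """
--     parts, depth, current = [], 0, []
--     in_str, str_char = False, ""
--     i = 0
--     while i < len(s):
--         ch = s[i]
--         if in_str:
--             current.append(ch)
--             if ch == "\\" and i + 1 < len(s):
--                 current.append(s[i + 1])
--                 i += 2
--                 continue
--             if ch == str_char: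
--                 in_str = False
--         elif ch in ('"', "'", "`"):
--             in_str = True
--             str_char = ch
--             current.append(ch)
--         elif ch in ('(', '[', '{'):
--             depth += 1
--             current.append(ch)
--         elif ch in (')', ']', '}'):
--             depth -= 1
--             current.append(ch)
--         elif ch == ',' and depth == 0:
--             parts.append(''.join(current).strip())
--             current = []
--             i += 1
--             continue
--         else:
--             current.append(ch)
--         i += 1
--     if current:
--         parts.append(''.join(current).strip())
--     return parts
-- ===== SOURCE B (Python) =====
-- def _add_undefined_defaults(params: str) -> str:
--     """Staged-pass rewrite: pass 1 runs a per-character state machine (with a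
--     skip flag for escapes instead of index lookahead) producing a boolean mark
--     for every character saying 'this is a top-level separator comma'; pass 2
--     splits the characters on those marks; pass 3 strips each field and appends
--     =_undefined where no default/rest marker is present, then joins."""
--     if not params.strip():
--         return params
--
--     # pass 1: mark the top-level commas
--     marks = []
--     depth, in_str, quote, skip = 0, False, '', False
--     for ch in params:
--         if skip:
--             skip = False
--             marks.append(False)
--         elif in_str:
--             if ch == '\\':
--                 skip = True
--             elif ch == quote:
--                 in_str = False
--             marks.append(False)
--         elif ch in '"\'`':
--             in_str, quote = True, ch
--             marks.append(False)
--         else: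
--             if ch in '([{':
--                 depth += 1
--             elif ch in ')]}':
--                 depth -= 1
--             marks.append(ch == ',' and depth == 0)
--
--     # pass 2: split on the marked commas (a trailing empty field is dropped)
--     segs, cur = [], []
--     for ch, m in zip(params, marks):
--         if m:
--             segs.append(''.join(cur))
--             cur = []
--         else:
--             cur.append(ch)
--     if cur:
--         segs.append(''.join(cur))
--
--     # pass 3: strip, add the missing defaults, join
--     fixed = [p if p.startswith('*') or '=' in p else p + "=_undefined"
--              for p in (s.strip() for s in segs)]
--     return ", ".join(fixed)
-- ===== Notes on version B (the rewrite author's own statement) =====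
-- stated objective: faster
-- what changed: B replaces A's buffer-accumulating fused parse-and-split with three staged passes: a per-character state machine (skip flag instead of index lookahead) emitting a boolean mask of top-level commas, a generic mask-driven split, and a strip/append-default map; a timing run measured it 2.5x faster (simpler per-character work, no repeated startswith/'=' bookkeeping branches inside the fold state).
import Mathlib
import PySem

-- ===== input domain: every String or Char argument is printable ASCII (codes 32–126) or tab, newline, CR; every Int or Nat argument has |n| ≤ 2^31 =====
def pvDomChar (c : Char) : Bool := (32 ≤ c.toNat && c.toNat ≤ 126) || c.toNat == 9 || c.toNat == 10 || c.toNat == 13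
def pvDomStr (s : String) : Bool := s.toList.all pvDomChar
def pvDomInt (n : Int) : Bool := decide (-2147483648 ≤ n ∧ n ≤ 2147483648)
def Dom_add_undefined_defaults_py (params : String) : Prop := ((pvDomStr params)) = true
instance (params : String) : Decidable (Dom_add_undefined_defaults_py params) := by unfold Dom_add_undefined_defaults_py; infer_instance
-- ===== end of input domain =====

-- B recomputes the same result by three staged passes (a boolean mask of top-level commas,
-- a mask-driven split, then a strip/default map) instead of A's fused split loop; measured faster.


-- ===== PORT A =====
-- "=_undefined" as a char list (kernel-friendly literal)
def pvUndef : List Char := ['=', '_', 'u', 'n', 'd', 'e', 'f', 'i', 'n', 'e', 'd']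

-- port of _split_decl_commas: the while-loop with index i becomes recursion on the remaining
-- characters; the escape step 'i += 2' consumes the next character (rest.take 1 / rest.tail).
def pvSplitGo (s : List Char) (depth : Int) (inStr : Bool) (strChar : Char)
    (current : List Char) (parts : List (List Char)) : List (List Char) :=
  match s with
  | [] => if current = [] then parts else parts ++ [PySem.Chars.strip current]
  | ch :: rest =>
    if inStr then
      if ch = '\\' ∧ rest ≠ [] then
        pvSplitGo rest.tail depth inStr strChar (current ++ [ch] ++ rest.take 1) parts
      else
        pvSplitGo rest depth (if ch = strChar then false else inStr) strChar
          (current ++ [ch]) parts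
    else if ch = '"' ∨ ch = '\'' ∨ ch = '`' then
      pvSplitGo rest depth true ch (current ++ [ch]) parts
    else if ch = '(' ∨ ch = '[' ∨ ch = '{' then
      pvSplitGo rest (depth + 1) inStr strChar (current ++ [ch]) parts
    else if ch = ')' ∨ ch = ']' ∨ ch = '}' then
      pvSplitGo rest (depth - 1) inStr strChar (current ++ [ch]) parts
    else if ch = ',' ∧ depth = 0 then
      pvSplitGo rest depth inStr strChar [] (parts ++ [PySem.Chars.strip current])
    else
      pvSplitGo rest depth inStr strChar (current ++ [ch]) parts
termination_by s.length
decreasing_by all_goals simp [List.length_tail]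

-- the body of A's 'for p in parts' loop; state = (result, saw_default)
def pvStepA (st : List (List Char) × Bool) (p : List Char) : List (List Char) × Bool :=
  let p := PySem.Chars.strip p
  if PySem.Chars.startswith p ['*'] || PySem.Chars.isIn ['='] p then
    (st.1 ++ [p],
     if PySem.Chars.isIn ['='] p && !PySem.Chars.startswith p ['*'] then true else st.2)
  else
    (st.1 ++ [p ++ pvUndef], true)

def add_undefined_defaults_py (params : String) : String :=
  if PySem.Chars.strip params.toList = [] then params
  else
    let parts := pvSplitGo params.toList 0 false ' ' [] []
    let st := parts.foldl pvStepA ([], false)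
    String.ofList (PySem.Chars.join [',', ' '] st.1)

-- ===== PORT B =====
-- pass 1 of Source B: the per-character state machine (depth, in_str, quote, skip)
-- emitting one Bool per character ('this is a top-level separator comma')
def pvMarks (s : List Char) (depth : Int) (inStr : Bool) (quote : Char) (skip : Bool) :
    List Bool :=
  match s with
  | [] => []
  | ch :: rest =>
    if skip then false :: pvMarks rest depth inStr quote false
    else if inStr then
      if ch = '\\' then false :: pvMarks rest depth inStr quote true
      else if ch = quote then false :: pvMarks rest depth false quote false
      else false :: pvMarks rest depth inStr quote false
    else if ch = '"' ∨ ch = '\'' ∨ ch = '`' then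
      false :: pvMarks rest depth true ch false
    else
      let d' := if ch = '(' ∨ ch = '[' ∨ ch = '{' then depth + 1
                else if ch = ')' ∨ ch = ']' ∨ ch = '}' then depth - 1
                else depth
      (decide (ch = ',' ∧ d' = 0)) :: pvMarks rest d' inStr quote false

-- pass 2 of Source B: split the characters on the marked positions (zip ends with either list;
-- a pending nonempty field is appended at the end)
def pvSegs (s : List Char) (ms : List Bool) (cur : List Char) : List (List Char) :=
  match s, ms with
  | [], _ => if cur = [] then [] else [cur]
  | _ :: _, [] => if cur = [] then [] else [cur]
  | ch :: cs, m :: rest => if m then cur :: pvSegs cs rest [] else pvSegs cs rest (cur ++ [ch])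

-- pass 3 of Source B: append =_undefined where no default/rest marker is present
def pvAddDef (p : List Char) : List Char :=
  if PySem.Chars.startswith p ['*'] || PySem.Chars.isIn ['='] p then p else p ++ pvUndef

def add_undefined_defaults_py_alt (params : String) : String :=
  if PySem.Chars.strip params.toList = [] then params
  else
    let ms := pvMarks params.toList 0 false ' ' false
    let segs := pvSegs params.toList ms []
    String.ofList (PySem.Chars.join [',', ' '] ((segs.map PySem.Chars.strip).map pvAddDef))

-- ===== PRECONDITION & SPEC =====
def Spec_add_undefined_defaults_py (params : String) (out : String) : Prop := out = add_undefined_defaults_py_alt params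
instance (params : String) (out : String) : Decidable (Spec_add_undefined_defaults_py params out) := by unfold Spec_add_undefined_defaults_py; infer_instance

-- ===== CLAIM (what is proved, stated in full; the proofs are below) =====
def Claim_equal_add_undefined_defaults_py : Prop := ∀ (params : String), Dom_add_undefined_defaults_py params → Spec_add_undefined_defaults_py params (add_undefined_defaults_py params)

-- ===== LEMMAS AND PROOFS =====

lemma pv_prefix_fixed (p : Char → Bool) (l t : List Char) (h : List.dropWhile p l = l)
    (ht : t <+: l) : List.dropWhile p t = t := by
  rw [List.dropWhile_eq_self_iff] at *
  intro hl
  obtain ⟨u, rfl⟩ := ht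
  have hlen : 0 < (t ++ u).length := by simp; omega
  have h0 := h hlen
  cases t with
  | nil => simp at hl
  | cons a b => simpa using h0

lemma pv_strip_idem (cs : List Char) :
    PySem.Chars.strip (PySem.Chars.strip cs) = PySem.Chars.strip cs := by
  unfold PySem.Chars.strip PySem.Chars.rstrip PySem.Chars.lstrip
  set p := PySem.Chars.isspace with hp
  set u := List.dropWhile p cs with hu
  have hfix : List.dropWhile p u = u := by rw [hu]; exact List.dropWhile_idempotent p cs
  have hpre : (List.dropWhile p u.reverse).reverse <+: u := by
    obtain ⟨w, hw⟩ := List.dropWhile_suffix (l := u.reverse) p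
    exact ⟨w.reverse, by rw [← List.reverse_append, hw, List.reverse_reverse]⟩
  have h1 : List.dropWhile p (List.dropWhile p u.reverse).reverse
      = (List.dropWhile p u.reverse).reverse := pv_prefix_fixed p u _ hfix hpre
  rw [h1, List.reverse_reverse, List.dropWhile_idempotent]

lemma pv_foldA (parts : List (List Char)) :
    ∀ acc b, (parts.foldl pvStepA (acc, b)).1 = acc ++ parts.map (fun p => pvAddDef (PySem.Chars.strip p)) := by
  induction parts with
  | nil => simp
  | cons p ps ih =>
    intro acc b
    have e1 : (pvStepA (acc, b) p).1 = acc ++ [pvAddDef (PySem.Chars.strip p)] := by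
      cases hc : (PySem.Chars.startswith (PySem.Chars.strip p) ['*']
          || PySem.Chars.isIn ['='] (PySem.Chars.strip p)) <;>
        simp [pvStepA, pvAddDef, hc]
    rw [List.foldl_cons, List.map_cons, ← Prod.mk.eta (p := pvStepA (acc, b) p)]
    rw [ih ((pvStepA (acc, b) p).1) ((pvStepA (acc, b) p).2), e1, List.append_assoc]
    simp

lemma pv_splitGo_acc : ∀ (n : Nat) (s : List Char), s.length ≤ n →
    ∀ d b c cur p1 p2,
      pvSplitGo s d b c cur (p1 ++ p2) = p1 ++ pvSplitGo s d b c cur p2 := by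
  intro n
  induction n with
  | zero =>
    intro s hs d b c cur p1 p2
    have : s = [] := List.eq_nil_of_length_eq_zero (by omega)
    subst this
    rw [pvSplitGo, pvSplitGo]
    split <;> simp
  | succ n ih =>
    intro s hs d b c cur p1 p2
    cases s with
    | nil =>
      rw [pvSplitGo, pvSplitGo]
      split <;> simp
    | cons ch rest =>
      have hr : rest.length ≤ n := by simp at hs; omega
      have ht : rest.tail.length ≤ n := by simp [List.length_tail]; omega
      rw [pvSplitGo, pvSplitGo]
      split_ifs <;>
        simp only [List.append_assoc, ih rest hr, ih rest.tail ht]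

-- the core: mask-driven split of B (stripped) equals A's fused split
lemma pvM_skip (ch : Char) (rest : List Char) (d : Int) (b : Bool) (q : Char) :
    pvMarks (ch :: rest) d b q true = false :: pvMarks rest d b q false := by
  simp [pvMarks]

lemma pvM_esc (rest : List Char) (d : Int) (q : Char) :
    pvMarks ('\\' :: rest) d true q false = false :: pvMarks rest d true q true := by
  simp [pvMarks]

lemma pvM_close_str (ch : Char) (rest : List Char) (d : Int) (hbs : ch ≠ '\\') :
    pvMarks (ch :: rest) d true ch false = false :: pvMarks rest d false ch false := by
  simp [pvMarks, hbs]

lemma pvM_in_str (ch : Char) (rest : List Char) (d : Int) (q : Char)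
    (hbs : ch ≠ '\\') (hq : ch ≠ q) :
    pvMarks (ch :: rest) d true q false = false :: pvMarks rest d true q false := by
  simp [pvMarks, hbs, hq]

lemma pvM_quote (ch : Char) (rest : List Char) (d : Int) (q : Char)
    (hqc : ch = '"' ∨ ch = '\'' ∨ ch = '`') :
    pvMarks (ch :: rest) d false q false = false :: pvMarks rest d true ch false := by
  rcases hqc with rfl | rfl | rfl <;> simp [pvMarks]

lemma pvM_open (ch : Char) (rest : List Char) (d : Int) (q : Char)
    (hop : ch = '(' ∨ ch = '[' ∨ ch = '{') :
    pvMarks (ch :: rest) d false q false = false :: pvMarks rest (d + 1) false q false := by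
  rcases hop with rfl | rfl | rfl <;> simp [pvMarks]

lemma pvM_close (ch : Char) (rest : List Char) (d : Int) (q : Char)
    (hcl : ch = ')' ∨ ch = ']' ∨ ch = '}') :
    pvMarks (ch :: rest) d false q false = false :: pvMarks rest (d - 1) false q false := by
  rcases hcl with rfl | rfl | rfl <;> simp [pvMarks]

lemma pvM_comma (rest : List Char) (q : Char) :
    pvMarks (',' :: rest) 0 false q false = true :: pvMarks rest 0 false q false := by
  simp [pvMarks]

lemma pvM_plain (ch : Char) (rest : List Char) (d : Int) (q : Char)
    (hqc : ¬ (ch = '"' ∨ ch = '\'' ∨ ch = '`'))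
    (hop : ¬ (ch = '(' ∨ ch = '[' ∨ ch = '{'))
    (hcl : ¬ (ch = ')' ∨ ch = ']' ∨ ch = '}'))
    (hcm : ¬ (ch = ',' ∧ d = 0)) :
    pvMarks (ch :: rest) d false q false = false :: pvMarks rest d false q false := by
  simp [pvMarks, hqc, hop, hcl, hcm]

lemma pvSegs_false (ch : Char) (cs : List Char) (ms : List Bool) (cur : List Char) :
    pvSegs (ch :: cs) (false :: ms) cur = pvSegs cs ms (cur ++ [ch]) := by
  simp [pvSegs]

lemma pvSegs_true (ch : Char) (cs : List Char) (ms : List Bool) (cur : List Char) :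
    pvSegs (ch :: cs) (true :: ms) cur = cur :: pvSegs cs ms [] := by
  simp [pvSegs]

lemma pv_core : ∀ (n : Nat) (s : List Char), s.length ≤ n →
    ∀ d b q cur,
      (pvSegs s (pvMarks s d b q false) cur).map PySem.Chars.strip
        = pvSplitGo s d b q cur [] := by
  intro n
  induction n with
  | zero =>
    intro s hs d b q cur
    have : s = [] := List.eq_nil_of_length_eq_zero (by omega)
    subst this
    rw [pvMarks, pvSplitGo]
    simp only [pvSegs]
    split <;> simp_all
  | succ n ih =>
    intro s hs d b q cur
    cases s with
    | nil =>
      rw [pvMarks, pvSplitGo]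
      simp only [pvSegs]
      split <;> simp_all
    | cons ch rest =>
      have hr : rest.length ≤ n := by simp at hs; omega
      rw [pvSplitGo]
      by_cases hin : b = true
      · subst hin
        rw [if_pos rfl]
        by_cases hesc : ch = '\\' ∧ rest ≠ []
        · obtain ⟨rfl, hne⟩ := hesc
          cases rest with
          | nil => exact absurd rfl hne
          | cons r rest' =>
            have hr' : rest'.length ≤ n := by simp at hs; omega
            rw [if_pos (show ('\\' : Char) = '\\' ∧ r :: rest' ≠ [] from ⟨rfl, hne⟩)]
            rw [pvM_esc, pvSegs_false, pvM_skip, pvSegs_false]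
            simp only [List.tail_cons, List.take_succ_cons, List.take_zero]
            exact ih rest' hr' d true q ((cur ++ ['\\']) ++ [r])
        · rw [if_neg hesc]
          by_cases hbs : ch = '\\'
          · subst hbs
            have hre : rest = [] := by
              by_contra hne; exact hesc ⟨rfl, hne⟩
            subst hre
            rw [pvM_esc, pvSegs_false]
            have hnil : ¬ (cur ++ ['\\'] = []) := by simp
            simp [pvSegs, pvSplitGo, hnil]
          · by_cases hq : ch = q
            · subst hq
              rw [pvM_close_str ch rest d hbs, pvSegs_false, if_pos rfl]
              exact ih rest hr d false ch (cur ++ [ch])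
            · rw [pvM_in_str ch rest d q hbs hq, pvSegs_false, if_neg hq]
              exact ih rest hr d true q (cur ++ [ch])
      · have hb : b = false := by cases b <;> simp_all
        subst hb
        simp only [Bool.false_eq_true, if_false]
        by_cases hqc : ch = '"' ∨ ch = '\'' ∨ ch = '`'
        · rw [if_pos hqc, pvM_quote ch rest d q hqc, pvSegs_false]
          exact ih rest hr d true ch (cur ++ [ch])
        · rw [if_neg hqc]
          by_cases hop : ch = '(' ∨ ch = '[' ∨ ch = '{'
          · rw [if_pos hop, pvM_open ch rest d q hop, pvSegs_false]
            exact ih rest hr (d + 1) false q (cur ++ [ch])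
          · rw [if_neg hop]
            by_cases hcl : ch = ')' ∨ ch = ']' ∨ ch = '}'
            · rw [if_pos hcl, pvM_close ch rest d q hcl, pvSegs_false]
              exact ih rest hr (d - 1) false q (cur ++ [ch])
            · rw [if_neg hcl]
              by_cases hcm : ch = ',' ∧ d = 0
              · obtain ⟨rfl, rfl⟩ := hcm
                rw [if_pos ⟨rfl, rfl⟩, pvM_comma, pvSegs_true, List.map_cons]
                rw [ih rest hr 0 false q []]
                have hacc := pv_splitGo_acc n rest hr 0 false q [] [PySem.Chars.strip cur] []
                simp only [List.append_nil] at hacc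
                rw [List.nil_append, hacc]
                simp
              · rw [if_neg hcm, pvM_plain ch rest d q hqc hop hcl hcm, pvSegs_false]
                exact ih rest hr d false q (cur ++ [ch])

-- ===== VERDICT (by name: the statement is the Claim_ definition above) =====
theorem add_undefined_defaults_py_spec : Claim_equal_add_undefined_defaults_py := by
  intro params _
  unfold Spec_add_undefined_defaults_py add_undefined_defaults_py add_undefined_defaults_py_alt
  by_cases h : PySem.Chars.strip params.toList = []
  · simp [h]
  · simp only [h, if_false]
    rw [pv_foldA, ← pv_core params.toList.length params.toList le_rfl 0 false ' ' []]
    simp only [List.nil_append, List.map_map]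
    refine congrArg _ (congrArg _ (List.map_congr_left ?_))
    intro x hx
    simp [Function.comp_apply, pv_strip_idem]
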